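-- pv_equiv track=rewrite | github.com/DannyMoss25/SSW567PART3 | main.py | securityCheck
-- ===== SOURCE A (Python) =====
-- def securityCheck(codeGiven, codeGenerated, listGiven, listGenerated):
--     messageToReturn = ""
--
--     for a in range(len(codeGiven)):
--         if(int(codeGiven[a]) != int(codeGenerated[a])):
--             if(a == 0):
--                 messageToReturn += "Passport Number SECURITY NUMBER FAILED: Expected: " + str(codeGenerated[a]) + " Received: " + str(codeGiven[a]) + "\n"
--             elif(a==1):
--                 messageToReturn += "DATE OF BIRTH SECURITY NUMBER FAILED: Expected: " + str(codeGenerated[a]) + " Received: " + str(codeGiven[a]) + "\n"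
--             elif(a==2):
--                 messageToReturn += "EXPIRATION DATE SECURITY NUMBER FAILED: Expected: " + str(codeGenerated[a]) + " Received: " + str(codeGiven[a]) + "\n"
--             elif(a==3):
--                 messageToReturn += "PERSONAL NUMBER SECURITY NUMBER FAILED: Expected: " + str(codeGenerated[a]) + " Received: " + str(codeGiven[a]) + "\n"
--
--     for a in range(len(listGiven)):
--         if((listGiven[a]) != (listGenerated[a])):
--             if(a == 0):
--                 messageToReturn += "Passport Number FIELD FAILED: Expected: " + str(listGenerated[a]) + " Received: " + str(listGiven[a]) + "\n"
--             elif(a==1):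
--                 messageToReturn += "DATE OF BIRTH FIELD FAILED: Expected: " + str(listGenerated[a]) + " Received: " + str(listGiven[a]) + "\n"
--             elif(a==2):
--                 messageToReturn += "EXPIRATION DATE FIELD FAILED: Expected: " + str(listGenerated[a]) + " Received: " + str(listGiven[a]) + "\n"
--             elif(a==3):
--                 messageToReturn += "PERSONAL NUMBER FIELD FAILED: Expected: " + str(listGenerated[a]) + " Received: " + str(listGiven[a]) + "\n"
--
--     if(len(messageToReturn) == 0):
--         messageToReturn = "Record came up clean"
--     return messageToReturn
-- ===== SOURCE B (Python) =====
-- LABELS = ['Passport Number', 'DATE OF BIRTH', 'EXPIRATION DATE', 'PERSONAL NUMBER']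
--
--
-- def _mismatches(labels, given, generated, suffix, coerce):
--     # Recursion on the label list: it both names the field and bounds the scan,
--     # so no index arithmetic, no range(), no if/elif ladder is needed.
--     if not labels or not given or not generated:
--         return []
--     rest = _mismatches(labels[1:], given[1:], generated[1:], suffix, coerce)
--     if coerce(given[0]) != coerce(generated[0]):
--         return [labels[0] + suffix + "Expected: " + str(generated[0])
--                 + " Received: " + str(given[0]) + "\n"] + rest
--     return rest
--
--
-- def securityCheck(codeGiven, codeGenerated, listGiven, listGenerated):
--     lines = _mismatches(LABELS, codeGiven, codeGenerated, " SECURITY NUMBER FAILED: ", int) \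
--           + _mismatches(LABELS, listGiven, listGenerated, " FIELD FAILED: ", str)
--     return "".join(lines) or "Record came up clean"
-- ===== Notes on version B (the rewrite author's own statement) =====
-- stated objective: simpler
-- what changed: Replaces A's two index loops with if/elif label ladders by a recursive helper that walks the label list together with the two value lists (the labels themselves bound and name the comparison, so no indices, no range, no branch ladder), returns mismatch lines as a list, and the result is a single join of the two concatenated line lists.
import Mathlib
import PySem

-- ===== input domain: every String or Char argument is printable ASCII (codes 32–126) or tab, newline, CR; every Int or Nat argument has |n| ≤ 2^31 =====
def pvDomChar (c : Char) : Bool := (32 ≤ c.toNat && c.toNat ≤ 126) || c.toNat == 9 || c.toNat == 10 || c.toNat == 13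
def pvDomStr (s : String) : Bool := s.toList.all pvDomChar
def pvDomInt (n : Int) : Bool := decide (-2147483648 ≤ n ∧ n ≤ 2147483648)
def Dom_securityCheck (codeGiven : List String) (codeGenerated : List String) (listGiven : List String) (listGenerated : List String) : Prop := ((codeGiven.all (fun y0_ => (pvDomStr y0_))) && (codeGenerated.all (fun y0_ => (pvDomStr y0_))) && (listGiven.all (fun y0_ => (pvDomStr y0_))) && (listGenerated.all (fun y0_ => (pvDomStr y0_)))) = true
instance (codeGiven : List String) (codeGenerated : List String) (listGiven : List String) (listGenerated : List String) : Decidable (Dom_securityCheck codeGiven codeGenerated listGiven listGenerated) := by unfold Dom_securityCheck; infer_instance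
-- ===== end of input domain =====

-- B replaces A's two index loops with if/elif label ladders by a recursive helper walking the
-- label list together with the two value lists, collecting mismatch lines and joining them once;
-- objective: simpler.

-- ===== PORT A =====
def securityCheck (codeGiven : List String) (codeGenerated : List String) (listGiven : List String) (listGenerated : List String) : String :=
  let m1 := (PySem.List.pyRange 0 (PySem.List.len codeGiven) 1).foldl (fun messageToReturn a =>
    let g := PySem.List.pyGetD codeGiven a ""
    let e := PySem.List.pyGetD codeGenerated a ""
    if (PySem.Int.ofStr? g).getD 0 ≠ (PySem.Int.ofStr? e).getD 0 then
      if a = 0 then messageToReturn ++ ("Passport Number SECURITY NUMBER FAILED: Expected: " ++ e ++ " Received: " ++ g ++ "\n")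
      else if a = 1 then messageToReturn ++ ("DATE OF BIRTH SECURITY NUMBER FAILED: Expected: " ++ e ++ " Received: " ++ g ++ "\n")
      else if a = 2 then messageToReturn ++ ("EXPIRATION DATE SECURITY NUMBER FAILED: Expected: " ++ e ++ " Received: " ++ g ++ "\n")
      else if a = 3 then messageToReturn ++ ("PERSONAL NUMBER SECURITY NUMBER FAILED: Expected: " ++ e ++ " Received: " ++ g ++ "\n")
      else messageToReturn
    else messageToReturn) ""
  let m2 := (PySem.List.pyRange 0 (PySem.List.len listGiven) 1).foldl (fun messageToReturn a =>
    let g := PySem.List.pyGetD listGiven a ""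
    let e := PySem.List.pyGetD listGenerated a ""
    if g ≠ e then
      if a = 0 then messageToReturn ++ ("Passport Number FIELD FAILED: Expected: " ++ e ++ " Received: " ++ g ++ "\n")
      else if a = 1 then messageToReturn ++ ("DATE OF BIRTH FIELD FAILED: Expected: " ++ e ++ " Received: " ++ g ++ "\n")
      else if a = 2 then messageToReturn ++ ("EXPIRATION DATE FIELD FAILED: Expected: " ++ e ++ " Received: " ++ g ++ "\n")
      else if a = 3 then messageToReturn ++ ("PERSONAL NUMBER FIELD FAILED: Expected: " ++ e ++ " Received: " ++ g ++ "\n")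
      else messageToReturn
    else messageToReturn) m1
  if PySem.Str.len m2 = 0 then "Record came up clean" else m2

-- ===== PORT B =====
def pvLabels : List String := ["Passport Number", "DATE OF BIRTH", "EXPIRATION DATE", "PERSONAL NUMBER"]

-- Source B's _mismatches: structural recursion on the three lists; the coerce parameter is ported as
-- the Boolean equality test eqc it induces (int → compare parsed ints, str → compare strings).
def pvMismatches (labels given generated : List String) (suffix : String) (eqc : String → String → Bool) : List String :=
  match labels, given, generated with
  | lab :: ls, g :: gs, e :: es =>
      let rest := pvMismatches ls gs es suffix eqc
      if !(eqc g e) then (lab ++ suffix ++ "Expected: " ++ e ++ " Received: " ++ g ++ "\n") :: rest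
      else rest
  | _, _, _ => []

def securityCheck_alt (codeGiven : List String) (codeGenerated : List String) (listGiven : List String) (listGenerated : List String) : String :=
  let lines := pvMismatches pvLabels codeGiven codeGenerated " SECURITY NUMBER FAILED: "
                 (fun g e => (PySem.Int.ofStr? g).getD 0 == (PySem.Int.ofStr? e).getD 0)
            ++ pvMismatches pvLabels listGiven listGenerated " FIELD FAILED: " (fun g e => g == e)
  let msg := String.join lines
  if msg = "" then "Record came up clean" else msg

-- ===== PRECONDITION & SPEC =====
-- Pre_ = exactly the inputs where A returns normally: each generated list at least as long as its
-- given list (else IndexError) and every code string A parses is a valid int literal (else ValueError).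
def Pre_securityCheck (codeGiven : List String) (codeGenerated : List String) (listGiven : List String) (listGenerated : List String) : Prop :=
  codeGiven.length ≤ codeGenerated.length ∧ listGiven.length ≤ listGenerated.length ∧
  (∀ s ∈ codeGiven, (PySem.Int.ofStr? s).isSome) ∧
  (∀ s ∈ codeGenerated.take codeGiven.length, (PySem.Int.ofStr? s).isSome)
instance (codeGiven : List String) (codeGenerated : List String) (listGiven : List String) (listGenerated : List String) : Decidable (Pre_securityCheck codeGiven codeGenerated listGiven listGenerated) := by unfold Pre_securityCheck; infer_instance

def pvWitness_securityCheck : List String × List String × List String × List String :=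
  (["1", "2"], ["1", "3"], ["a"], ["b"])

def Spec_securityCheck (codeGiven : List String) (codeGenerated : List String) (listGiven : List String) (listGenerated : List String) (out : String) : Prop := out = securityCheck_alt codeGiven codeGenerated listGiven listGenerated
instance (codeGiven : List String) (codeGenerated : List String) (listGiven : List String) (listGenerated : List String) (out : String) : Decidable (Spec_securityCheck codeGiven codeGenerated listGiven listGenerated out) := by unfold Spec_securityCheck; infer_instance

-- ===== CLAIM (what is proved, stated in full; the proofs are below) =====
def Claim_equal_securityCheck : Prop := ∀ (codeGiven : List String) (codeGenerated : List String) (listGiven : List String) (listGenerated : List String), Dom_securityCheck codeGiven codeGenerated listGiven listGenerated → Pre_securityCheck codeGiven codeGenerated listGiven listGenerated → Spec_securityCheck codeGiven codeGenerated listGiven listGenerated (securityCheck codeGiven codeGenerated listGiven listGenerated)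

-- ===== LEMMAS AND PROOFS =====

-- reference form of one report pass, indexed from a
def pvRef (suffix : String) (eqc : String → String → Bool) : Int → List (String × String) → String
  | _, [] => ""
  | a, (g, e) :: rest =>
      (if a < 4 && !(eqc g e) then PySem.List.pyGetD pvLabels a "" ++ suffix ++ "Expected: " ++ e ++ " Received: " ++ g ++ "\n" else "")
      ++ pvRef suffix eqc (a + 1) rest

-- pvMismatches with the two value lists pre-zipped
def pvMP (suffix : String) (eqc : String → String → Bool) : List String → List (String × String) → List String
  | lab :: ls, (g, e) :: ps =>
      let rest := pvMP suffix eqc ls ps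
      if !(eqc g e) then (lab ++ suffix ++ "Expected: " ++ e ++ " Received: " ++ g ++ "\n") :: rest
      else rest
  | _, _ => []

theorem pvJoin_nil : String.join ([] : List String) = "" := rfl

theorem pvFoldl_join : ∀ (l : List String) (s : String), l.foldl (· ++ ·) s = s ++ String.join l := by
  intro l
  induction l with
  | nil => intro s; simp [String.join]
  | cons h t ih =>
    intro s
    rw [List.foldl_cons, ih]
    rw [show String.join (h :: t) = t.foldl (· ++ ·) ("" ++ h) from rfl]
    rw [ih ("" ++ h)]
    simp [String.append_assoc]

theorem pvJoin_cons (s : String) (l : List String) : String.join (s :: l) = s ++ String.join l := by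
  rw [show String.join (s :: l) = l.foldl (· ++ ·) ("" ++ s) from rfl, pvFoldl_join]
  simp

theorem pvJoin_append (l1 l2 : List String) : String.join (l1 ++ l2) = String.join l1 ++ String.join l2 := by
  induction l1 with
  | nil => simp [pvJoin_nil]
  | cons h t ih => simp [pvJoin_cons, ih, String.append_assoc]

theorem pvMismatches_eq_pvMP (suffix : String) (eqc : String → String → Bool) :
    ∀ (labels given generated : List String),
      pvMismatches labels given generated suffix eqc = pvMP suffix eqc labels (given.zip generated) := by
  intro labels
  induction labels with
  | nil => intro g e; cases g <;> cases e <;> rfl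
  | cons lab ls ih =>
    intro g e
    cases g with
    | nil => cases e <;> rfl
    | cons gh gt =>
      cases e with
      | nil => rfl
      | cons eh et => simp only [pvMismatches, pvMP, List.zip_cons_cons, ih]

theorem pvRef_ge4 (suffix : String) (eqc : String → String → Bool) :
    ∀ (l : List (String × String)) (aN : Nat), 4 ≤ aN → pvRef suffix eqc (aN : Int) l = "" := by
  intro l
  induction l with
  | nil => intro aN _; simp [pvRef]
  | cons p rest ih =>
    intro aN h
    obtain ⟨g, e⟩ := p
    have hlt : ¬ ((aN : Int) < 4) := by exact_mod_cast (by omega : ¬ (aN < 4))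
    have hih := ih (aN + 1) (by omega)
    push_cast at hih
    simp only [pvRef, hlt, decide_eq_true_eq, Bool.false_and, decide_false, if_false, hih]
    simp

theorem pvRef_eq_join (suffix : String) (eqc : String → String → Bool) :
    ∀ (l : List (String × String)) (aN : Nat),
      pvRef suffix eqc (aN : Int) l = String.join (pvMP suffix eqc (pvLabels.drop aN) l) := by
  intro l
  induction l with
  | nil => intro aN; cases h : pvLabels.drop aN <;> simp [pvRef, pvMP, String.join]
  | cons p rest ih =>
    intro aN
    obtain ⟨g, e⟩ := p
    by_cases h4 : aN < 4
    · interval_cases aN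
      · have hih := ih 1; push_cast at hih ⊢
        by_cases hc : eqc g e <;>
          simp [pvRef, pvMP, hc, hih, pvJoin_cons, pvLabels, String.append_assoc,
            PySem.List.pyGetD, PySem.List.pyIdx?, pvJoin_nil]
      · have hih := ih 2; push_cast at hih ⊢
        by_cases hc : eqc g e <;>
          simp [pvRef, pvMP, hc, hih, pvJoin_cons, pvLabels, String.append_assoc,
            PySem.List.pyGetD, PySem.List.pyIdx?, pvJoin_nil]
      · have hih := ih 3; push_cast at hih ⊢
        by_cases hc : eqc g e <;>
          simp [pvRef, pvMP, hc, hih, pvJoin_cons, pvLabels, String.append_assoc,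
            PySem.List.pyGetD, PySem.List.pyIdx?, pvJoin_nil]
      · have hih := pvRef_ge4 suffix eqc rest 4 (by omega); push_cast at hih ⊢
        by_cases hc : eqc g e <;>
          simp [pvRef, pvMP, hc, hih, pvJoin_cons, pvLabels, String.append_assoc,
            PySem.List.pyGetD, PySem.List.pyIdx?, pvJoin_nil]
    · have hdrop : pvLabels.drop aN = [] := by
        apply List.drop_eq_nil_of_le; simp [pvLabels]; omega
      rw [hdrop, pvRef_ge4 suffix eqc _ aN (by omega)]
      simp [pvMP, String.join]

-- A's first loop equals pvRef on the zip, assuming generated long enough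
theorem loopA_code (cg cgen : List String) (hlen : cg.length ≤ cgen.length) :
    ∀ (k aN : Nat) (m : String), aN + k = cg.length →
    (PySem.List.pyRange (aN : Int) (PySem.List.len cg) 1).foldl (fun messageToReturn a =>
      let g := PySem.List.pyGetD cg a ""
      let e := PySem.List.pyGetD cgen a ""
      if (PySem.Int.ofStr? g).getD 0 ≠ (PySem.Int.ofStr? e).getD 0 then
        if a = 0 then messageToReturn ++ ("Passport Number SECURITY NUMBER FAILED: Expected: " ++ e ++ " Received: " ++ g ++ "\n")
        else if a = 1 then messageToReturn ++ ("DATE OF BIRTH SECURITY NUMBER FAILED: Expected: " ++ e ++ " Received: " ++ g ++ "\n")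
        else if a = 2 then messageToReturn ++ ("EXPIRATION DATE SECURITY NUMBER FAILED: Expected: " ++ e ++ " Received: " ++ g ++ "\n")
        else if a = 3 then messageToReturn ++ ("PERSONAL NUMBER SECURITY NUMBER FAILED: Expected: " ++ e ++ " Received: " ++ g ++ "\n")
        else messageToReturn
      else messageToReturn) m
    = m ++ pvRef " SECURITY NUMBER FAILED: "
        (fun g e => (PySem.Int.ofStr? g).getD 0 == (PySem.Int.ofStr? e).getD 0) (aN : Int) ((cg.zip cgen).drop aN) := by
  intro k
  induction k with
  | zero =>
    intro aN m h
    rw [PySem.List.pyRange_one_eq_nil (by simp [PySem.List.len_eq]; omega)]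
    rw [List.drop_eq_nil_of_le (by simp [List.length_zip]; omega)]
    simp [pvRef]
  | succ k ih =>
    intro aN m h
    have hlt : aN < cg.length := by omega
    have hlt2 : aN < cgen.length := by omega
    rw [PySem.List.pyRange_one_cons (by simp [PySem.List.len_eq]; exact_mod_cast hlt)]
    rw [List.foldl_cons]
    have hzl : aN < (cg.zip cgen).length := by simp [List.length_zip]; omega
    rw [List.drop_eq_getElem_cons hzl]
    have hcast : ((aN : Int) + 1) = ((aN + 1 : Nat) : Int) := by push_cast; ring
    rw [hcast, ih (aN + 1) _ (by omega)]
    rw [List.getElem_zip]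
    simp only [pvRef, PySem.List.pyGetD_natCast, List.getD_eq_getElem cg _ hlt,
      List.getD_eq_getElem cgen _ hlt2]
    by_cases hde : (PySem.Int.ofStr? cg[aN]).getD 0 = (PySem.Int.ofStr? cgen[aN]).getD 0
    · simp [hde]
    · rcases aN with _ | _ | _ | _ | aN
      · have hp : "Passport Number SECURITY NUMBER FAILED: Expected: "
            = PySem.List.pyGetD pvLabels ((0 : Nat) : Int) "" ++ " SECURITY NUMBER FAILED: " ++ "Expected: " := by decide
        rw [hp]; simp [hde, String.append_assoc] <;> decide
      · have hp : "DATE OF BIRTH SECURITY NUMBER FAILED: Expected: "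
            = PySem.List.pyGetD pvLabels ((1 : Nat) : Int) "" ++ " SECURITY NUMBER FAILED: " ++ "Expected: " := by decide
        rw [hp]; simp [hde, String.append_assoc] <;> decide
      · have hp : "EXPIRATION DATE SECURITY NUMBER FAILED: Expected: "
            = PySem.List.pyGetD pvLabels ((2 : Nat) : Int) "" ++ " SECURITY NUMBER FAILED: " ++ "Expected: " := by decide
        rw [hp]; simp [hde, String.append_assoc] <;> decide
      · have hp : "PERSONAL NUMBER SECURITY NUMBER FAILED: Expected: "
            = PySem.List.pyGetD pvLabels ((3 : Nat) : Int) "" ++ " SECURITY NUMBER FAILED: " ++ "Expected: " := by decide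
        rw [hp]; simp [hde, String.append_assoc] <;> decide
      · split_ifs <;>
          first
          | (exfalso; omega)
          | (exfalso; simp only [Bool.and_eq_true, decide_eq_true_eq] at *; omega)
          | simp [String.append_assoc]

theorem loopA_field (lg lgen : List String) (hlen : lg.length ≤ lgen.length) :
    ∀ (k aN : Nat) (m : String), aN + k = lg.length →
    (PySem.List.pyRange (aN : Int) (PySem.List.len lg) 1).foldl (fun messageToReturn a =>
      let g := PySem.List.pyGetD lg a ""
      let e := PySem.List.pyGetD lgen a ""
      if g ≠ e then
        if a = 0 then messageToReturn ++ ("Passport Number FIELD FAILED: Expected: " ++ e ++ " Received: " ++ g ++ "\n")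
        else if a = 1 then messageToReturn ++ ("DATE OF BIRTH FIELD FAILED: Expected: " ++ e ++ " Received: " ++ g ++ "\n")
        else if a = 2 then messageToReturn ++ ("EXPIRATION DATE FIELD FAILED: Expected: " ++ e ++ " Received: " ++ g ++ "\n")
        else if a = 3 then messageToReturn ++ ("PERSONAL NUMBER FIELD FAILED: Expected: " ++ e ++ " Received: " ++ g ++ "\n")
        else messageToReturn
      else messageToReturn) m
    = m ++ pvRef " FIELD FAILED: " (fun g e => g == e) (aN : Int) ((lg.zip lgen).drop aN) := by
  intro k
  induction k with
  | zero =>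
    intro aN m h
    rw [PySem.List.pyRange_one_eq_nil (by simp [PySem.List.len_eq]; omega)]
    rw [List.drop_eq_nil_of_le (by simp [List.length_zip]; omega)]
    simp [pvRef]
  | succ k ih =>
    intro aN m h
    have hlt : aN < lg.length := by omega
    have hlt2 : aN < lgen.length := by omega
    rw [PySem.List.pyRange_one_cons (by simp [PySem.List.len_eq]; exact_mod_cast hlt)]
    rw [List.foldl_cons]
    have hzl : aN < (lg.zip lgen).length := by simp [List.length_zip]; omega
    rw [List.drop_eq_getElem_cons hzl]
    have hcast : ((aN : Int) + 1) = ((aN + 1 : Nat) : Int) := by push_cast; ring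
    rw [hcast, ih (aN + 1) _ (by omega)]
    rw [List.getElem_zip]
    simp only [pvRef, PySem.List.pyGetD_natCast, List.getD_eq_getElem lg _ hlt,
      List.getD_eq_getElem lgen _ hlt2]
    by_cases hde : lg[aN] = lgen[aN]
    · simp [hde]
    · rcases aN with _ | _ | _ | _ | aN
      · have hp : "Passport Number FIELD FAILED: Expected: "
            = PySem.List.pyGetD pvLabels ((0 : Nat) : Int) "" ++ " FIELD FAILED: " ++ "Expected: " := by decide
        rw [hp]; simp [hde, String.append_assoc] <;> decide
      · have hp : "DATE OF BIRTH FIELD FAILED: Expected: "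
            = PySem.List.pyGetD pvLabels ((1 : Nat) : Int) "" ++ " FIELD FAILED: " ++ "Expected: " := by decide
        rw [hp]; simp [hde, String.append_assoc] <;> decide
      · have hp : "EXPIRATION DATE FIELD FAILED: Expected: "
            = PySem.List.pyGetD pvLabels ((2 : Nat) : Int) "" ++ " FIELD FAILED: " ++ "Expected: " := by decide
        rw [hp]; simp [hde, String.append_assoc] <;> decide
      · have hp : "PERSONAL NUMBER FIELD FAILED: Expected: "
            = PySem.List.pyGetD pvLabels ((3 : Nat) : Int) "" ++ " FIELD FAILED: " ++ "Expected: " := by decide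
        rw [hp]; simp [hde, String.append_assoc] <;> decide
      · split_ifs <;>
          first
          | (exfalso; omega)
          | (exfalso; simp only [Bool.and_eq_true, decide_eq_true_eq] at *; omega)
          | simp [String.append_assoc]

-- ===== VERDICT (by name: the statement is the Claim_ definition above) =====
theorem securityCheck_spec : Claim_equal_securityCheck := by
  intro cg cgen lg lgen _ hpre
  obtain ⟨h1, h2, _, _⟩ := hpre
  unfold Spec_securityCheck securityCheck securityCheck_alt
  simp only [pvMismatches_eq_pvMP]
  simp only [pvJoin_append]
  have hb1 := pvRef_eq_join " SECURITY NUMBER FAILED: "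
    (fun g e => (PySem.Int.ofStr? g).getD 0 == (PySem.Int.ofStr? e).getD 0) (cg.zip cgen) 0
  have hb2 := pvRef_eq_join " FIELD FAILED: " (fun g e => g == e) (lg.zip lgen) 0
  simp only [Nat.cast_zero, List.drop_zero] at hb1 hb2
  simp only [← hb1, ← hb2]
  have hA1 := loopA_code cg cgen h1 cg.length 0 "" (by omega)
  have hA2 := fun m => loopA_field lg lgen h2 lg.length 0 m (by omega)
  simp only [Nat.cast_zero, List.drop_zero] at hA1 hA2
  simp only [hA1, hA2]
  have hlen : ∀ (s t : String), ((s.length : Int) + t.length = 0) ↔ (s = "" ∧ t = "") := by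
    intro s t
    rw [show ((s.length:Int) + t.length = 0) ↔ (s.length = 0 ∧ t.length = 0) by omega]
    simp [String.length_eq_zero_iff]
  simp [PySem.Str.len_eq, hlen]
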